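-- pv_equiv track=rewrite | github.com/md-173/leetcode | python/3541.py | maxFreqSum
-- ===== SOURCE A (Python) =====
-- def maxFreqSum(s: str) -> int:
--     vowels = set("aeiou")
--     freq = {}
--     for ch in s:
--         freq[ch] = freq.get(ch, 0) + 1
--     max_vowel = 0
--     max_consonant = 0
--     for ch, count in freq.items():
--         if ch in vowels:
--             max_vowel = max(max_vowel, count)
--         else:
--             max_consonant = max(max_consonant, count)
--     return max_vowel + max_consonant
-- ===== SOURCE B (Python) =====
-- def maxFreqSum(s: str) -> int:
--     # Recursive partition-and-remove: take the first remaining character, count it,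
--     # delete all of its occurrences, recurse on what is left. No frequency table.
--     def go(chars):
--         if not chars:
--             return (0, 0)
--         c = chars[0]
--         cnt = chars.count(c)
--         rest = [x for x in chars if x != c]
--         bv, bc = go(rest)
--         if c in "aeiou":
--             return (max(bv, cnt), bc)
--         return (bv, max(bc, cnt))
--     bv, bc = go(list(s))
--     return bv + bc
-- ===== Notes on version B (the rewrite author's own statement) =====
-- stated objective: alternative
-- what changed: Replaces A's frequency dictionary + items pass by a recursive partition-and-remove: repeatedly take the first remaining character, count its occurrences, filter them all out and recurse on the shrunken list, combining the (best vowel, best consonant) pair on the way back up.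
import Mathlib
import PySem

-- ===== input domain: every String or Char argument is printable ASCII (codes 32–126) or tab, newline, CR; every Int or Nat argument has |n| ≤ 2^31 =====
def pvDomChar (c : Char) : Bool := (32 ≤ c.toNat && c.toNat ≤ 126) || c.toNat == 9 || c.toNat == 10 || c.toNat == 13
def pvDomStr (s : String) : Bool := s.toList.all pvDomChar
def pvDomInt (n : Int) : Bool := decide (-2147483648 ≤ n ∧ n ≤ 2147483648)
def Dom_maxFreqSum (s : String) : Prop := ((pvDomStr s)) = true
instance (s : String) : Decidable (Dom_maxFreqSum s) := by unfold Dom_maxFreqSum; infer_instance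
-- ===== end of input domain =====

-- B replaces A's frequency dictionary by a recursive partition-and-remove over the distinct characters (count the first char, filter it out, recurse); equal return value proved.


-- ===== PORT A =====
def maxFreqSum (s : String) : Int :=
  let vowels : PySem.Set Char := PySem.Set.ofList "aeiou".toList
  let freq : PySem.Dict Char Int :=
    s.toList.foldl (fun d ch => d.insert ch (d.getD ch 0 + 1)) PySem.Dict.empty
  let mv : Int × Int :=
    freq.items.foldl (fun acc kv =>
      if PySem.Set.contains vowels kv.1 then (max acc.1 kv.2, acc.2)
      else (acc.1, max acc.2 kv.2)) (0, 0)
  mv.1 + mv.2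

-- ===== PORT B =====
-- go(chars): count chars[0], filter out all its occurrences, recurse on the rest
def maxFreqSumGo : List Char → Int × Int
  | [] => (0, 0)
  | c :: t =>
      let cnt : Int := ((c :: t).count c : Nat)
      let rest := (c :: t).filter (fun x => x != c)
      let r := maxFreqSumGo rest
      if "aeiou".toList.contains c then (max r.1 cnt, r.2) else (r.1, max r.2 cnt)
termination_by l => l.length
decreasing_by
  simp only [List.filter_cons, bne_self_eq_false, Bool.false_eq_true, if_false, List.length_cons,
    Nat.lt_succ_iff]
  exact List.length_filter_le _ _

def maxFreqSum_alt (s : String) : Int :=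
  let r := maxFreqSumGo s.toList
  r.1 + r.2

-- ===== PRECONDITION & SPEC =====
def Spec_maxFreqSum (s : String) (out : Int) : Prop := out = maxFreqSum_alt s
instance (s : String) (out : Int) : Decidable (Spec_maxFreqSum s out) := by unfold Spec_maxFreqSum; infer_instance

-- ===== CLAIM (what is proved, stated in full; the proofs are below) =====
def Claim_equal_maxFreqSum : Prop := ∀ (s : String), Dom_maxFreqSum s → Spec_maxFreqSum s (maxFreqSum s)

-- ===== LEMMAS AND PROOFS =====

-- A's single pass over the items, carrying the (max_vowel, max_consonant) pair, splits into two
-- independent running-max folds over the vowel items and the consonant items.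
theorem pairfold_split (p : Char → Bool) (f : Char → Int) (l : List Char) (a b : Int) :
    l.foldl (fun acc c => if p c then (max acc.1 (f c), acc.2) else (acc.1, max acc.2 (f c))) (a, b)
      = ((l.filter p).foldl (fun m c => max m (f c)) a,
         (l.filter (fun c => !p c)).foldl (fun m c => max m (f c)) b) := by
  induction l generalizing a b with
  | nil => rfl
  | cons x t ih =>
      by_cases h : p x = true <;> simp [h, List.foldl_cons, ih]

-- the running-max fold over the counts of the distinct q-characters of l
def Fmax (q : Char → Bool) (l : List Char) : Int :=
  ((PySem.Set.ofList l).filter q).foldl (fun m c => max m ((l.count c : Nat) : Int)) 0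

theorem foldl_max_le_iff (l : List Int) (a x : Int) :
    l.foldl max a ≤ x ↔ a ≤ x ∧ ∀ y ∈ l, y ≤ x := by
  induction l generalizing a with
  | nil => simp
  | cons z t ih =>
      simp only [List.foldl_cons, ih, List.mem_cons, max_le_iff]
      constructor
      · rintro ⟨⟨ha, hz⟩, ht⟩
        exact ⟨ha, fun y hy => hy.elim (fun h => h ▸ hz) (ht y)⟩
      · rintro ⟨ha, h⟩
        exact ⟨⟨ha, h z (Or.inl rfl)⟩, fun y hy => h y (Or.inr hy)⟩

theorem foldl_max_map (l : List Char) (f : Char → Int) (a : Int) :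
    (l.map f).foldl max a = l.foldl (fun m c => max m (f c)) a := by rw [List.foldl_map]

theorem Fmax_le_iff (q : Char → Bool) (l : List Char) (x : Int) :
    Fmax q l ≤ x ↔ 0 ≤ x ∧ ∀ d ∈ l, q d = true → ((l.count d : Nat) : Int) ≤ x := by
  unfold Fmax
  rw [← foldl_max_map, foldl_max_le_iff]
  constructor
  · rintro ⟨h0, h⟩
    refine ⟨h0, fun d hd hq => ?_⟩
    exact h _ (List.mem_map_of_mem (List.mem_filter.mpr ⟨(PySem.Set.mem_ofList l d).mpr hd, hq⟩))
  · rintro ⟨h0, h⟩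
    refine ⟨h0, fun y hy => ?_⟩
    obtain ⟨d, hd, rfl⟩ := List.mem_map.mp hy
    obtain ⟨hdl, hq⟩ := List.mem_filter.mp hd
    exact h d ((PySem.Set.mem_ofList l d).mp hdl) hq

theorem Fmax_nonneg (q : Char → Bool) (l : List Char) : 0 ≤ Fmax q l := by
  unfold Fmax
  rw [← foldl_max_map]
  exact (PySem.List.le_foldl_max _ _).1

theorem le_Fmax (q : Char → Bool) (l : List Char) (d : Char) (hd : d ∈ l) (hq : q d = true) :
    ((l.count d : Nat) : Int) ≤ Fmax q l := by
  unfold Fmax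
  rw [← foldl_max_map]
  exact (PySem.List.le_foldl_max _ _).2 _
    (List.mem_map_of_mem (List.mem_filter.mpr ⟨(PySem.Set.mem_ofList l d).mpr hd, hq⟩))

-- counts after filtering out c: unchanged for d ≠ c
theorem count_rest (c d : Char) (t : List Char) (hdc : d ≠ c) :
    (((c :: t).filter (fun x => x != c)).count d) = (c :: t).count d := by
  rw [List.count_filter]
  simp [hdc]

theorem mem_rest (c d : Char) (t : List Char) (hd : d ∈ c :: t) (hdc : d ≠ c) :
    d ∈ (c :: t).filter (fun x => x != c) := by
  exact List.mem_filter.mpr ⟨hd, by simp [hdc]⟩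

-- removing every occurrence of a q-character c: the max splits off count c
theorem Fmax_cons_pos (q : Char → Bool) (c : Char) (t : List Char) (hq : q c = true) :
    Fmax q (c :: t)
      = max (Fmax q ((c :: t).filter (fun x => x != c))) (((c :: t).count c : Nat) : Int) := by
  set rest := (c :: t).filter (fun x => x != c) with hrest
  apply le_antisymm
  · rw [Fmax_le_iff]
    refine ⟨le_trans (Fmax_nonneg q rest) (le_max_left _ _), fun d hd hqd => ?_⟩
    by_cases hdc : d = c
    · subst hdc; exact le_max_right _ _
    · refine le_trans ?_ (le_max_left _ _)
      rw [← count_rest c d t hdc]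
      exact le_Fmax q rest d (mem_rest c d t hd hdc) hqd
  · rw [max_le_iff]
    constructor
    · rw [Fmax_le_iff]
      refine ⟨Fmax_nonneg q _, fun d hd hqd => ?_⟩
      have hdc : d ≠ c := by
        have := (List.mem_filter.mp (hrest ▸ hd)).2
        simpa using this
      rw [count_rest c d t hdc]
      exact le_Fmax q (c :: t) d (List.mem_of_mem_filter (hrest ▸ hd)) hqd
    · exact le_Fmax q (c :: t) c (by simp) hq

-- removing every occurrence of a non-q-character c leaves the q-max unchanged
theorem Fmax_cons_neg (q : Char → Bool) (c : Char) (t : List Char) (hq : q c = false) :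
    Fmax q (c :: t) = Fmax q ((c :: t).filter (fun x => x != c)) := by
  set rest := (c :: t).filter (fun x => x != c) with hrest
  apply le_antisymm
  · rw [Fmax_le_iff]
    refine ⟨Fmax_nonneg q rest, fun d hd hqd => ?_⟩
    have hdc : d ≠ c := fun h => by subst h; rw [hq] at hqd; exact absurd hqd (by simp)
    rw [← count_rest c d t hdc]
    exact le_Fmax q rest d (mem_rest c d t hd hdc) hqd
  · rw [Fmax_le_iff]
    refine ⟨Fmax_nonneg q _, fun d hd hqd => ?_⟩
    have hdc : d ≠ c := by
      have := (List.mem_filter.mp (hrest ▸ hd)).2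
      simpa using this
    rw [count_rest c d t hdc]
    exact le_Fmax q (c :: t) d (List.mem_of_mem_filter (hrest ▸ hd)) hqd

def pVow (c : Char) : Bool := "aeiou".toList.contains c

theorem go_eq (l : List Char) :
    maxFreqSumGo l = (Fmax pVow l, Fmax (fun c => !pVow c) l) := by
  induction l using maxFreqSumGo.induct with
  | case1 => rw [maxFreqSumGo]; decide
  | case2 c t rest hc ih =>
      have ih' : maxFreqSumGo ((c :: t).filter (fun x => x != c))
          = (Fmax pVow ((c :: t).filter (fun x => x != c)),
             Fmax (fun c => !pVow c) ((c :: t).filter (fun x => x != c))) := ih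
      have hfe : (c :: t).filter (fun x => x != c) = t.filter (fun x => x != c) := by simp
      rw [hfe] at ih'
      rw [maxFreqSumGo]
      simp only [hc, if_true]
      rw [Fmax_cons_pos pVow c t hc,
          Fmax_cons_neg (fun c => !pVow c) c t (by have : pVow c = true := hc; simp [this])]
      simp [ih']
  | case3 c t rest hc ih =>
      have hcF : ("aeiou".toList.contains c) = false := by simpa using hc
      have ih' : maxFreqSumGo ((c :: t).filter (fun x => x != c))
          = (Fmax pVow ((c :: t).filter (fun x => x != c)),
             Fmax (fun c => !pVow c) ((c :: t).filter (fun x => x != c))) := ih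
      have hfe : (c :: t).filter (fun x => x != c) = t.filter (fun x => x != c) := by simp
      rw [hfe] at ih'
      rw [maxFreqSumGo]
      simp only [hcF, Bool.false_eq_true, if_false]
      rw [Fmax_cons_neg pVow c t hcF,
          Fmax_cons_pos (fun c => !pVow c) c t (by have : pVow c = false := hcF; simp [this])]
      simp [ih']

theorem maxFreqSum_eq (s : String) : maxFreqSum s = maxFreqSum_alt s := by
  have hset : PySem.Set.ofList "aeiou".toList = "aeiou".toList := by decide
  simp only [maxFreqSum, maxFreqSum_alt,
    PySem.Dict.foldl_insert_getD_add_one_eq_counter, PySem.Dict.items_counter,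
    List.foldl_map, hset, PySem.Set.contains]
  rw [pairfold_split (fun c => "aeiou".toList.contains c) (fun c => ((s.toList.count c : Nat) : Int))]
  rw [go_eq]
  rfl

-- ===== VERDICT (by name: the statement is the Claim_ definition above) =====
theorem maxFreqSum_spec : Claim_equal_maxFreqSum := by
  intro s _
  exact maxFreqSum_eq s
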